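-- pv_equiv track=rewrite | github.com/G4tLan/fxbot | consolidation_breakout.py | last_true_indices
-- ===== SOURCE A (Python) =====
-- def last_true_indices(segments):
--     """
--     Returns (start_index, end_index) of the last True segment
--     in the expanded array.
--     """
--     cumulative_index = 0
--     last_true_start = None
--     last_true_end = None
--
--     for is_true, length in segments:
--         if is_true:
--             last_true_start = cumulative_index
--             last_true_end = cumulative_index + length
--         cumulative_index += length
--
--     if last_true_start is None:
--         return (None, None)  # no True segment
--     else:
--         return (last_true_start, last_true_end - 1)
-- ===== SOURCE B (Python) =====
-- def last_true_indices(segments):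
--     """
--     Returns (start_index, end_index) of the last True segment
--     in the expanded array.
--     """
--     segs = list(segments)
--     cum = sum(length for _, length in segs)
--     for is_true, length in reversed(segs):
--         cum -= length
--         if is_true:
--             return (cum, cum + length - 1)
--     return (None, None)
-- ===== Notes on version B (the rewrite author's own statement) =====
-- stated objective: alternative
-- what changed: B first materializes the segments and sums their lengths, then scans the list in reverse with a decreasing cumulative position and returns on the first True segment found (the last in original order), instead of A's forward pass that overwrites the answer on every True segment.
import Mathlib
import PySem

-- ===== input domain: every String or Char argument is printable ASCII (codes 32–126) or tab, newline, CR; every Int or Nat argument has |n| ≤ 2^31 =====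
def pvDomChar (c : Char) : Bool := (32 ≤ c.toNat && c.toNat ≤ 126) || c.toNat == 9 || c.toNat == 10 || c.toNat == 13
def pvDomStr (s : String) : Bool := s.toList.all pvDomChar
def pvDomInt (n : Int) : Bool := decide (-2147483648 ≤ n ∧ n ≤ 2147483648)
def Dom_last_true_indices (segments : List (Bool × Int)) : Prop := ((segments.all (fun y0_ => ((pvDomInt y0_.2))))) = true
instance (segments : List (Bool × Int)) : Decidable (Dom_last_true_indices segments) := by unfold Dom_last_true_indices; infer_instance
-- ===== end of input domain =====

-- B replaces A's forward overwrite pass by a reverse scan with early exit; objective: alternative decomposition.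

-- ===== PORT A =====
-- forward loop: state (cumulative_index, last_true_start, last_true_end)
def last_true_indices (segments : List (Bool × Int)) : Option Int × Option Int :=
  let st := segments.foldl
    (fun (st : Int × Option Int × Option Int) p =>
      let c := st.1
      if p.1 then (c + p.2, some c, some (c + p.2))
      else (c + p.2, st.2.1, st.2.2))
    (0, none, none)
  match st.2.1, st.2.2 with
  | none, _ => (none, none)
  | some s, e => (some s, e.map (fun x => x - 1))

-- ===== PORT B =====
-- reverse scan: cum starts at the total length, is decremented before each check,
-- first True segment met (last in original order) returns immediately
def lastTrueRev : Int → List (Bool × Int) → Option Int × Option Int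
  | _, [] => (none, none)
  | cum, p :: rest =>
      let cum' := cum - p.2
      if p.1 then (some cum', some (cum' + p.2 - 1)) else lastTrueRev cum' rest

def last_true_indices_alt (segments : List (Bool × Int)) : Option Int × Option Int :=
  let segs := segments
  let total := segs.foldl (fun a p => a + p.2) 0
  lastTrueRev total segs.reverse

-- ===== PRECONDITION & SPEC =====
def Spec_last_true_indices (segments : List (Bool × Int)) (out : Option Int × Option Int) : Prop := out = last_true_indices_alt segments
instance (segments : List (Bool × Int)) (out : Option Int × Option Int) : Decidable (Spec_last_true_indices segments out) := by unfold Spec_last_true_indices; infer_instance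

-- ===== CLAIM (what is proved, stated in full; the proofs are below) =====
def Claim_equal_last_true_indices : Prop := ∀ (segments : List (Bool × Int)), Dom_last_true_indices segments → Spec_last_true_indices segments (last_true_indices segments)

-- ===== LEMMAS AND PROOFS =====

def foldA (xs : List (Bool × Int)) (init : Int × Option Int × Option Int) : Int × Option Int × Option Int :=
  xs.foldl
    (fun (st : Int × Option Int × Option Int) p =>
      let c := st.1
      if p.1 then (c + p.2, some c, some (c + p.2))
      else (c + p.2, st.2.1, st.2.2))
    init

theorem last_true_indices_eq_foldA (segments : List (Bool × Int)) :
    last_true_indices segments =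
      (match (foldA segments (0, none, none)).2.1, (foldA segments (0, none, none)).2.2 with
       | none, _ => (none, none)
       | some s, e => (some s, e.map (fun x => x - 1))) := rfl

-- total length as foldl
def sumLen (xs : List (Bool × Int)) : Int := xs.foldl (fun a p => a + p.2) 0

theorem sumLen_append (xs : List (Bool × Int)) (p : Bool × Int) :
    sumLen (xs ++ [p]) = sumLen xs + p.2 := by
  simp [sumLen]

theorem foldl_shift (xs : List (Bool × Int)) (c : Int) :
    xs.foldl (fun a p => a + p.2) c = c + sumLen xs := by
  induction xs generalizing c with
  | nil => simp [sumLen]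
  | cons p rest ih =>
      simp only [List.foldl_cons, sumLen] at *
      rw [ih (c + p.2), ih (0 + p.2)]; ring

theorem sumLen_cons (p : Bool × Int) (rest : List (Bool × Int)) :
    sumLen (p :: rest) = p.2 + sumLen rest := by
  simp only [sumLen, List.foldl_cons]
  rw [foldl_shift rest (0 + p.2),
      show sumLen rest = List.foldl (fun a p => a + p.2) 0 rest from rfl]
  ring

theorem foldA_cum (xs : List (Bool × Int)) (c : Int) (s e : Option Int) :
    (foldA xs (c, s, e)).1 = c + sumLen xs := by
  induction xs generalizing c s e with
  | nil => simp [foldA, sumLen]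
  | cons p rest ih =>
      simp only [foldA, List.foldl_cons]
      rw [sumLen_cons]
      split
      · rw [show (List.foldl _ (c + p.2, some c, some (c + p.2)) rest
            = foldA rest (c + p.2, some c, some (c + p.2))) from rfl, ih]
        ring
      · rw [show (List.foldl _ (c + p.2, s, e) rest
            = foldA rest (c + p.2, s, e)) from rfl, ih]
        ring

theorem main_eq (segments : List (Bool × Int)) :
    last_true_indices segments = last_true_indices_alt segments := by
  induction segments using List.reverseRecOn with
  | nil => rfl
  | append_singleton xs p ih =>
      have hB : last_true_indices_alt (xs ++ [p])
          = (let cum' := sumLen (xs ++ [p]) - p.2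
             if p.1 then (some cum', some (cum' + p.2 - 1))
             else lastTrueRev cum' xs.reverse) := by
        simp only [last_true_indices_alt, List.reverse_append, List.reverse_singleton,
          List.singleton_append, lastTrueRev]
        rfl
      have hsum : sumLen (xs ++ [p]) - p.2 = sumLen xs := by
        rw [sumLen_append]; ring
      have hA : foldA (xs ++ [p]) (0, none, none)
          = (let st := foldA xs (0, none, none)
             if p.1 then (st.1 + p.2, some st.1, some (st.1 + p.2))
             else (st.1 + p.2, st.2.1, st.2.2)) := by
        simp only [foldA, List.foldl_append, List.foldl_cons, List.foldl_nil]
      by_cases hp : p.1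
      · rw [last_true_indices_eq_foldA, hA, hB, hsum]
        simp [hp, foldA_cum xs 0 none none, sumLen]
      · rw [last_true_indices_eq_foldA, hA, hB, hsum]
        simp only [hp, if_false, Bool.false_eq_true]
        rw [← last_true_indices_eq_foldA]
        rw [ih]
        simp only [last_true_indices_alt, sumLen]

-- ===== VERDICT (by name: the statement is the Claim_ definition above) =====
theorem last_true_indices_spec : Claim_equal_last_true_indices := by
  intro segments _
  unfold Spec_last_true_indices
  exact main_eq segments
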